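-- pv_equiv track=rewrite | github.com/QwQ-maker/4box | 新改2/sbox_analysis_v2.py | mobius_transform
-- ===== SOURCE A (Python) =====
-- def mobius_transform(truth_table, n):
--     size = 1 << n
--     anf = truth_table[:]
--     for i in range(n):
--         step = 1 << i
--         for j in range(size):
--             if j & step:
--                 anf[j] ^= anf[j ^ step]
--     return anf
-- ===== SOURCE B (Python) =====
-- def _mob(xs):
--     # divide and conquer: ANF of a 2^k-length table = ANF(lo) followed by ANF(hi) XOR ANF(lo)
--     if len(xs) <= 1:
--         return xs[:]
--     h = len(xs) // 2
--     left = _mob(xs[:h])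
--     right = _mob(xs[h:])
--     return left + [x ^ y for x, y in zip(right, left)]
--
--
-- def mobius_transform(truth_table, n):
--     size = 1 << n
--     return _mob(truth_table[:size]) + truth_table[size:]
-- ===== Notes on version B (the rewrite author's own statement) =====
-- stated objective: alternative
-- what changed: Replaces A's in-place iterative butterfly (n rounds of indexed XOR updates guarded by a bit test) by a pure divide-and-conquer recursion: split the 2^n-entry table in halves, transform each half recursively, and append the pointwise XOR of the transformed halves; entries beyond index 2^n are returned unchanged, as A leaves them.
import Mathlib
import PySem

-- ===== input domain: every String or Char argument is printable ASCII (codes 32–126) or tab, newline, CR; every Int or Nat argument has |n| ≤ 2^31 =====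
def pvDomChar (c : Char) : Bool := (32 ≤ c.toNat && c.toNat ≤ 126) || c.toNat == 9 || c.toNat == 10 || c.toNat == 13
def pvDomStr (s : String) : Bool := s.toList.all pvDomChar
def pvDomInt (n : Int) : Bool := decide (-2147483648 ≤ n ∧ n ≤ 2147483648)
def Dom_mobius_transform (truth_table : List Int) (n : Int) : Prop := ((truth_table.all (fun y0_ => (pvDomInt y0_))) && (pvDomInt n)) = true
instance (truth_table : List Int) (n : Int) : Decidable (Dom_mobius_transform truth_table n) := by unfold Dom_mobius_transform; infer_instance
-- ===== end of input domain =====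

-- B replaces A's in-place iterative butterfly by a pure divide-and-conquer recursion
-- (transform the two halves, append left ++ (right XOR left)); alternative algorithm, same cost.

-- ===== PORT A =====
-- '1 << n' / '1 << i': shift counts are nonnegative on every admitted input (i ranges over
-- range(n) and Pre_ gives 0 ≤ n); '.toNat' is only a totality guard (Python raises for n < 0).
-- 'anf[j] ^= anf[j ^ step]' is pyGetD/pySetD; Pre_ keeps every touched index in range.
def mobius_transform (truth_table : List Int) (n : Int) : List Int :=
  let size : Int := 1 <<< n.toNat
  (PySem.List.pyRange 0 n 1).foldl (fun anf i =>
    let step : Int := 1 <<< i.toNat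
    (PySem.List.pyRange 0 size 1).foldl (fun anf j =>
      if PySem.Int.band j step ≠ 0 then
        PySem.List.pySetD anf j
          (PySem.Int.bxor (PySem.List.pyGetD anf j 0)
            (PySem.List.pyGetD anf (PySem.Int.bxor j step) 0))
      else anf) anf) truth_table

-- ===== PORT B =====
-- _mob from Source B; 'xs[:h]' / 'xs[h:]' with 0 ≤ h ≤ len(xs) are exactly take/drop
-- (PySem.List.slice_to_natCast / slice_from_natCast).
def mobrec (xs : List Int) : List Int :=
  if _h1 : xs.length ≤ 1 then xs
  else
    let h := xs.length / 2
    let left := mobrec (xs.take h)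
    let right := mobrec (xs.drop h)
    left ++ List.zipWith (fun x y => PySem.Int.bxor x y) right left
termination_by xs.length
decreasing_by
  · simp only [List.length_take]; omega
  · simp only [List.length_drop]; omega

def mobius_transform_alt (truth_table : List Int) (n : Int) : List Int :=
  let size : Int := 1 <<< n.toNat
  mobrec (PySem.List.slice truth_table none (some size)) ++
    PySem.List.slice truth_table (some size) none

-- ===== PRECONDITION & SPEC =====
-- Pre_: exactly the inputs where A returns: n ≥ 0 (1 << n raises otherwise) and, unless n = 0
-- (no loop iteration runs), 2^n ≤ len(truth_table) (otherwise some anf[j] raises IndexError);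
-- '2^n ≤ len' is written as 'n ≤ log2 len' so the condition stays cheap to check for large n.
def Pre_mobius_transform (truth_table : List Int) (n : Int) : Prop :=
  0 ≤ n ∧ (n = 0 ∨ (truth_table ≠ [] ∧ n.toNat ≤ Nat.log2 truth_table.length))
instance (truth_table : List Int) (n : Int) : Decidable (Pre_mobius_transform truth_table n) := by
  unfold Pre_mobius_transform; infer_instance

def pvWitness_mobius_transform : List Int × Int := ([0, 1, 1, 0], 2)

def Spec_mobius_transform (truth_table : List Int) (n : Int) (out : List Int) : Prop := out = mobius_transform_alt truth_table n
instance (truth_table : List Int) (n : Int) (out : List Int) : Decidable (Spec_mobius_transform truth_table n out) := by unfold Spec_mobius_transform; infer_instance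

-- ===== CLAIM (what is proved, stated in full; the proofs are below) =====
def Claim_equal_mobius_transform : Prop := ∀ (truth_table : List Int) (n : Int), Dom_mobius_transform truth_table n → Pre_mobius_transform truth_table n → Spec_mobius_transform truth_table n (mobius_transform truth_table n)

-- ===== LEMMAS AND PROOFS =====

-- the functional content of A's inner pass with step s, stopped after index k
def pvPart (s k : Nat) (a : List Int) : List Int :=
  a.mapIdx (fun j x => if j < k ∧ j &&& s ≠ 0 then PySem.Int.bxor x (a.getD (j ^^^ s) 0) else x)

-- one full round with step s (every index active)
def pvRound (s : Nat) (a : List Int) : List Int :=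
  a.mapIdx (fun j x => if j &&& s ≠ 0 then PySem.Int.bxor x (a.getD (j ^^^ s) 0) else x)

theorem length_pvPart (s k : Nat) (a : List Int) : (pvPart s k a).length = a.length := by
  simp [pvPart]

theorem length_pvRound (s : Nat) (a : List Int) : (pvRound s a).length = a.length := by
  simp [pvRound]

theorem getElem_pvPart (s k : Nat) (a : List Int) (t : Nat) (h : t < (pvPart s k a).length) :
    (pvPart s k a)[t] =
      if t < k ∧ t &&& s ≠ 0 then
        PySem.Int.bxor (a[t]'(by simpa [pvPart] using h)) (a.getD (t ^^^ s) 0)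
      else a[t]'(by simpa [pvPart] using h) := by
  simp [pvPart, List.getElem_mapIdx]

theorem getElem_pvRound (s : Nat) (a : List Int) (t : Nat) (h : t < (pvRound s a).length) :
    (pvRound s a)[t] =
      if t &&& s ≠ 0 then
        PySem.Int.bxor (a[t]'(by simpa [pvRound] using h)) (a.getD (t ^^^ s) 0)
      else a[t]'(by simpa [pvRound] using h) := by
  simp [pvRound, List.getElem_mapIdx]

theorem pvPart_zero (s : Nat) (a : List Int) : pvPart s 0 a = a := by
  apply List.ext_getElem (by simp [pvPart])
  intro t h1 h2
  rw [getElem_pvPart]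
  simp

-- bit facts
theorem pvTestBit_pow_add (K j t : Nat) (h : j < 2^K) :
    (2^K + j).testBit t = (decide (t = K) || j.testBit t) := by
  rcases lt_trichotomy t K with h1 | h1 | h1
  · rw [Nat.testBit_two_pow_add_gt h1]
    simp [Nat.ne_of_lt h1]
  · subst h1
    rw [Nat.testBit_two_pow_add_eq, Nat.testBit_eq_false_of_lt h]
    simp
  · have h2 : 2^K + j < 2^t := by
      calc 2^K + j < 2^K + 2^K := by omega
      _ = 2^(K+1) := by rw [pow_succ]; ring
      _ ≤ 2^t := Nat.pow_le_pow_right (by omega) (by omega)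
    rw [Nat.testBit_eq_false_of_lt h2,
      Nat.testBit_eq_false_of_lt (lt_of_lt_of_le h (Nat.pow_le_pow_right (by omega) (by omega)))]
    simp [Nat.ne_of_gt h1]

theorem pvXor_clear (m i : Nat) (h : m &&& 2^i ≠ 0) : (m ^^^ 2^i) &&& 2^i = 0 := by
  have hm : m.testBit i = true := by
    by_contra hc
    simp only [Bool.not_eq_true] at hc
    rw [Nat.and_two_pow, hc] at h
    simp at h
  rw [Nat.and_two_pow, Nat.testBit_xor, hm, Nat.testBit_two_pow_self]
  simp

theorem pvAdd_land (K j s : Nat) (hj : j < 2^K) (hs : s < 2^K) :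
    (2^K + j) &&& s = j &&& s := by
  apply Nat.eq_of_testBit_eq
  intro t
  rw [Nat.testBit_and, Nat.testBit_and, pvTestBit_pow_add K j t hj]
  by_cases ht : t = K
  · subst ht
    rw [Nat.testBit_eq_false_of_lt hs]
    simp
  · simp [ht]

theorem pvAdd_xor (K j s : Nat) (hj : j < 2^K) (hs : s < 2^K) :
    (2^K + j) ^^^ s = 2^K + (j ^^^ s) := by
  apply Nat.eq_of_testBit_eq
  intro t
  rw [Nat.testBit_xor, pvTestBit_pow_add K j t hj,
    pvTestBit_pow_add K (j ^^^ s) t (Nat.xor_lt_two_pow hj hs), Nat.testBit_xor]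
  by_cases ht : t = K
  · subst ht
    rw [Nat.testBit_eq_false_of_lt hs]
    simp
  · simp [ht]

theorem pvLand_pow_self (K j : Nat) (h : j < 2^K) : j &&& 2^K = 0 := by
  rw [Nat.and_two_pow, Nat.testBit_eq_false_of_lt h]
  simp

theorem pvAdd_land_pow (K j : Nat) (h : j < 2^K) : (2^K + j) &&& 2^K ≠ 0 := by
  have ht : (2^K + j).testBit K = true := by
    rw [pvTestBit_pow_add K j K h]; simp
  rw [Nat.and_two_pow, ht]
  have := Nat.two_pow_pos K
  simp only [Bool.toNat_true, one_mul]
  omega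

theorem pvAdd_xor_pow (K j : Nat) (h : j < 2^K) : (2^K + j) ^^^ 2^K = j := by
  apply Nat.eq_of_testBit_eq
  intro t
  rw [Nat.testBit_xor, pvTestBit_pow_add K j t h]
  have hpow : (2^K : Nat).testBit t = decide (t = K) := by
    have := pvTestBit_pow_add K 0 t (Nat.two_pow_pos K)
    simpa using this
  rw [hpow]
  by_cases ht : t = K
  · subst ht
    rw [Nat.testBit_eq_false_of_lt h]
    simp
  · simp [ht]

-- one step of A's inner loop advances pvPart by one index
theorem pvStep (K i m : Nat) (a : List Int) (hi : i < K) (hlen : 2^K ≤ a.length) (hm : m < 2^K) :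
    (if PySem.Int.band ((m : Nat) : Int) (((2^i : Nat) : Int)) ≠ 0 then
      PySem.List.pySetD (pvPart (2^i) m a) ((m : Nat) : Int)
        (PySem.Int.bxor (PySem.List.pyGetD (pvPart (2^i) m a) ((m : Nat) : Int) 0)
          (PySem.List.pyGetD (pvPart (2^i) m a)
            (PySem.Int.bxor ((m : Nat) : Int) (((2^i : Nat) : Int))) 0))
    else pvPart (2^i) m a) = pvPart (2^i) (m+1) a := by
  have hstep : (2:Nat)^i < 2^K := Nat.pow_lt_pow_right (by omega) hi
  have hmlen : m < a.length := lt_of_lt_of_le hm hlen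
  have hr : m ^^^ 2^i < 2^K := Nat.xor_lt_two_pow hm hstep
  have hrlen : m ^^^ 2^i < a.length := lt_of_lt_of_le hr hlen
  by_cases hbit : m &&& 2^i = 0
  · simp only [PySem.Int.band_natCast, ne_eq, Int.natCast_eq_zero, hbit,
      not_true_eq_false, if_false]
    apply List.ext_getElem (by simp [pvPart])
    intro t h1 h2
    rw [getElem_pvPart, getElem_pvPart]
    by_cases htm : t = m
    · subst htm; simp [hbit]
    · have hiff : (t < m ∧ t &&& 2^i ≠ 0) ↔ (t < m + 1 ∧ t &&& 2^i ≠ 0) := by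
        constructor
        · rintro ⟨u, v⟩; exact ⟨by omega, v⟩
        · rintro ⟨u, v⟩; exact ⟨by omega, v⟩
      rw [if_congr hiff rfl rfl]
  · simp only [PySem.Int.band_natCast, PySem.Int.bxor_natCast, PySem.List.pyGetD_natCast,
      PySem.List.pySetD_natCast, ne_eq, Int.natCast_eq_zero, hbit, not_false_eq_true, if_true]
    have hPm : (pvPart (2^i) m a).getD m 0 = a[m] := by
      rw [List.getD_eq_getElem _ _ (by rw [length_pvPart]; exact hmlen), getElem_pvPart]
      simp
    have hPr : (pvPart (2^i) m a).getD (m ^^^ 2^i) 0 = a[m ^^^ 2^i] := by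
      rw [List.getD_eq_getElem _ _ (by rw [length_pvPart]; exact hrlen), getElem_pvPart]
      simp [pvXor_clear m i hbit]
    rw [hPm, hPr]
    apply List.ext_getElem (by simp [pvPart])
    intro t h1 h2
    rw [List.getElem_set]
    by_cases htm : m = t
    · subst htm
      rw [if_pos rfl, getElem_pvPart (2^i) (m+1) a m h2,
        if_pos (⟨by omega, hbit⟩ : m < m + 1 ∧ m &&& 2^i ≠ 0),
        List.getD_eq_getElem _ _ hrlen]
    · rw [if_neg htm, getElem_pvPart, getElem_pvPart]
      exact if_congr (by
        constructor
        · rintro ⟨u, v⟩; exact ⟨by omega, v⟩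
        · rintro ⟨u, v⟩; exact ⟨by omega, v⟩) rfl rfl

-- A's inner loop, started at index m, computes pvPart at 2^K
theorem pvInner (K i : Nat) (a : List Int) (hi : i < K) (hlen : 2^K ≤ a.length) :
    ∀ (d m : Nat), m + d = 2^K →
    (PySem.List.pyRange ((m : Nat) : Int) (((2^K : Nat)) : Int) 1).foldl
      (fun anf j =>
        if PySem.Int.band j (((2^i : Nat) : Int)) ≠ 0 then
          PySem.List.pySetD anf j
            (PySem.Int.bxor (PySem.List.pyGetD anf j 0)
              (PySem.List.pyGetD anf (PySem.Int.bxor j (((2^i : Nat) : Int))) 0))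
        else anf) (pvPart (2^i) m a) = pvPart (2^i) (2^K) a := by
  intro d
  induction d with
  | zero =>
    intro m hm
    have hme : m = 2^K := by omega
    subst hme
    rw [PySem.List.pyRange_one_eq_nil (by omega)]
    rfl
  | succ d ih =>
    intro m hm
    have hmlt : m < 2^K := by omega
    rw [PySem.List.pyRange_one_cons (by exact_mod_cast hmlt), List.foldl_cons]
    rw [show ((m : Nat) : Int) + 1 = (((m + 1 : Nat)) : Int) by push_cast; ring,
      pvStep K i m a hi hlen hmlt]
    exact ih (m + 1) (by omega)

-- a full pass over pre ++ tail only rewrites pre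
theorem pvPart_split (K i : Nat) (pre tail : List Int) (hi : i < K) (hpre : pre.length = 2^K) :
    pvPart (2^i) (2^K) (pre ++ tail) = pvRound (2^i) pre ++ tail := by
  have hstep : (2:Nat)^i < 2^K := Nat.pow_lt_pow_right (by omega) hi
  apply List.ext_getElem (by simp [pvPart, pvRound])
  intro t h1 h2
  rw [getElem_pvPart]
  by_cases ht : t < 2^K
  · have htpre : t < pre.length := by omega
    rw [List.getElem_append_left (by rw [length_pvRound]; omega : t < (pvRound (2^i) pre).length),
      getElem_pvRound]
    have hrd : t ^^^ 2^i < 2^K := Nat.xor_lt_two_pow ht hstep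
    by_cases hb : t &&& 2^i = 0
    · rw [if_neg (by simp [hb]), if_neg (by simp [hb]), List.getElem_append_left htpre]
    · rw [if_pos ⟨ht, hb⟩, if_pos hb, List.getElem_append_left htpre]
      congr 1
      rw [List.getD_eq_getElem _ _ (by simp [hpre]; omega : t ^^^ 2^i < (pre ++ tail).length),
        List.getD_eq_getElem _ _ (by omega : t ^^^ 2^i < pre.length),
        List.getElem_append_left (by omega : t ^^^ 2^i < pre.length)]
  · rw [if_neg (by rintro ⟨u, -⟩; omega),
      List.getElem_append_right (as := pre) (bs := tail) (by omega),
      List.getElem_append_right (as := pvRound (2^i) pre) (bs := tail)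
        (by rw [length_pvRound]; omega)]
    simp only [length_pvRound, hpre]

-- a round with small step acts on each half separately
theorem pvRound_halves (K s : Nat) (L R : List Int) (hs : s < 2^K)
    (hL : L.length = 2^K) (hR : R.length = 2^K) :
    pvRound s (L ++ R) = pvRound s L ++ pvRound s R := by
  apply List.ext_getElem (by simp [pvRound])
  intro t h1 h2
  have hlenL : (pvRound s L).length = 2^K := by rw [length_pvRound, hL]
  rw [getElem_pvRound]
  by_cases ht : t < 2^K
  · have htL : t < L.length := by omega
    rw [List.getElem_append_left (by omega : t < (pvRound s L).length), getElem_pvRound]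
    have hrd : t ^^^ s < 2^K := Nat.xor_lt_two_pow ht hs
    by_cases hb : t &&& s = 0
    · rw [if_neg (by simp [hb]), if_neg (by simp [hb]), List.getElem_append_left htL]
    · rw [if_pos hb, if_pos hb, List.getElem_append_left htL]
      congr 1
      rw [List.getD_eq_getElem _ _ (by simp [hL, hR]; omega : t ^^^ s < (L ++ R).length),
        List.getD_eq_getElem _ _ (by omega : t ^^^ s < L.length),
        List.getElem_append_left (by omega : t ^^^ s < L.length)]
  · obtain ⟨u, rfl⟩ : ∃ u, t = 2^K + u := ⟨t - 2^K, by omega⟩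
    have hu : u < 2^K := by
      rw [length_pvRound] at h1
      simp only [List.length_append, hL, hR] at h1
      omega
    have huR : u < R.length := by omega
    rw [List.getElem_append_right (as := pvRound s L) (bs := pvRound s R) (by omega)]
    have hidx : 2^K + u - (pvRound s L).length = u := by rw [hlenL]; omega
    simp only [hidx]
    rw [getElem_pvRound, pvAdd_land K u s hu hs, pvAdd_xor K u s hu hs]
    have hurs : u ^^^ s < 2^K := Nat.xor_lt_two_pow hu hs
    by_cases hb : u &&& s = 0
    · rw [if_neg (by simp [hb]), if_neg (by simp [hb]),
        List.getElem_append_right (as := L) (bs := R) (by omega)]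
      simp only [hL, show 2^K + u - 2^K = u from by omega]
    · rw [if_pos hb, if_pos hb]
      rw [List.getElem_append_right (as := L) (bs := R) (by omega)]
      rw [List.getD_eq_getElem _ _ (by simp [hL, hR]; omega : 2^K + (u ^^^ s) < (L ++ R).length),
        List.getElem_append_right (as := L) (bs := R) (by omega),
        List.getD_eq_getElem _ _ (by omega : u ^^^ s < R.length)]
      simp only [hL, show 2^K + u - 2^K = u from by omega,
        show 2^K + (u ^^^ s) - 2^K = u ^^^ s from by omega]

-- the last round XORs the left half into the right half
theorem pvRound_last (K : Nat) (L R : List Int) (hL : L.length = 2^K) (hR : R.length = 2^K) :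
    pvRound (2^K) (L ++ R) = L ++ List.zipWith (fun x y => PySem.Int.bxor x y) R L := by
  apply List.ext_getElem (by simp [pvRound, hL, hR])
  intro t h1 h2
  rw [getElem_pvRound]
  by_cases ht : t < 2^K
  · have htL : t < L.length := by omega
    rw [if_neg (by simp [pvLand_pow_self K t ht]),
      List.getElem_append_left (as := L) (bs := R) htL,
      List.getElem_append_left (as := L) (bs := List.zipWith (fun x y => PySem.Int.bxor x y) R L) htL]
  · obtain ⟨u, rfl⟩ : ∃ u, t = 2^K + u := ⟨t - 2^K, by omega⟩
    have hu : u < 2^K := by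
      rw [length_pvRound] at h1
      simp only [List.length_append, hL, hR] at h1
      omega
    rw [if_pos (pvAdd_land_pow K u hu), pvAdd_xor_pow K u hu]
    rw [List.getElem_append_right (as := L)
      (bs := List.zipWith (fun x y => PySem.Int.bxor x y) R L) (by omega)]
    rw [List.getElem_append_right (as := L) (bs := R) (by omega)]
    simp only [hL, show 2^K + u - 2^K = u from by omega]
    rw [List.getElem_zipWith]
    congr 1
    rw [List.getD_eq_getElem _ _ (by simp [hL, hR]; omega : u < (L ++ R).length),
      List.getElem_append_left (as := L) (bs := R) (by omega : u < L.length)]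

-- folding rounds over a split list
theorem pvFold_halves (K : Nat) :
    ∀ (l : List Nat), (∀ i ∈ l, 2^i < 2^K) →
    ∀ (L R : List Int), L.length = 2^K → R.length = 2^K →
    l.foldl (fun a i => pvRound (2^i) a) (L ++ R) =
      l.foldl (fun a i => pvRound (2^i) a) L ++ l.foldl (fun a i => pvRound (2^i) a) R := by
  intro l
  induction l with
  | nil => intro _ L R _ _; rfl
  | cons x xs ih =>
    intro hl L R hLl hRl
    rw [List.foldl_cons, List.foldl_cons, List.foldl_cons,
      pvRound_halves K (2^x) L R (hl x (List.mem_cons_self)) hLl hRl]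
    exact ih (fun i hi => hl i (List.mem_cons_of_mem x hi)) _ _
      (by rw [length_pvRound]; exact hLl) (by rw [length_pvRound]; exact hRl)

theorem length_foldl_pvRound (l : List Nat) (a : List Int) :
    (l.foldl (fun a i => pvRound (2^i) a) a).length = a.length := by
  induction l generalizing a with
  | nil => rfl
  | cons x xs ih => rw [List.foldl_cons, ih, length_pvRound]

-- the iterated rounds are exactly B's divide-and-conquer recursion
theorem pvRounds_eq_mobrec (K : Nat) : ∀ (a : List Int), a.length = 2^K →
    (List.range K).foldl (fun a i => pvRound (2^i) a) a = mobrec a := by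
  induction K with
  | zero =>
    intro a ha
    simp only [List.range_zero, List.foldl_nil]
    rw [mobrec, dif_pos (by simp [ha])]
  | succ K ih =>
    intro a ha
    have hpow : (2:Nat)^(K+1) = 2^K + 2^K := by rw [pow_succ]; ring
    have hpos : 1 ≤ (2:Nat)^K := Nat.one_le_two_pow
    have hL : (a.take (2^K)).length = 2^K := by simp [List.length_take]; omega
    have hR : (a.drop (2^K)).length = 2^K := by simp [List.length_drop]; omega
    rw [List.range_succ, List.foldl_append]
    conv_lhs => rw [show a = a.take (2^K) ++ a.drop (2^K) from (List.take_append_drop _ _).symm]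
    rw [pvFold_halves K (List.range K)
      (fun i hi => Nat.pow_lt_pow_right (by omega) (List.mem_range.mp hi)) _ _ hL hR]
    simp only [List.foldl_cons, List.foldl_nil]
    rw [pvRound_last K _ _ (by rw [length_foldl_pvRound]; exact hL)
      (by rw [length_foldl_pvRound]; exact hR)]
    rw [ih _ hL, ih _ hR]
    conv_rhs => rw [mobrec]
    rw [dif_neg (by omega)]
    have hdiv : a.length / 2 = 2^K := by omega
    simp only [hdiv]
  -- both sides are mobrec(take) ++ zipWith bxor (mobrec drop) (mobrec take)

-- A's whole loop nest on pre ++ tail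
theorem pvMaster (N : Nat) :
    ∀ (l : List Nat), (∀ i ∈ l, i < N) →
    ∀ (pre tail : List Int), pre.length = 2^N →
    l.foldl (fun a k =>
      (PySem.List.pyRange 0 (((2^N : Nat)) : Int) 1).foldl
        (fun anf j =>
          if PySem.Int.band j (((2^k : Nat) : Int)) ≠ 0 then
            PySem.List.pySetD anf j
              (PySem.Int.bxor (PySem.List.pyGetD anf j 0)
                (PySem.List.pyGetD anf (PySem.Int.bxor j (((2^k : Nat) : Int))) 0))
          else anf) a) (pre ++ tail)
    = l.foldl (fun a k => pvRound (2^k) a) pre ++ tail := by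
  intro l
  induction l with
  | nil => intro _ pre tail _; rfl
  | cons k l ih =>
    intro hl pre tail hpre
    have hk : k < N := hl k (List.mem_cons_self)
    have hinner := pvInner N k (pre ++ tail) hk (by simp [hpre]) (2^N) 0 (by omega)
    rw [pvPart_zero] at hinner
    simp only [Nat.cast_zero] at hinner
    rw [List.foldl_cons, List.foldl_cons, hinner, pvPart_split N k pre tail hk hpre]
    exact ih (fun i hi => hl i (List.mem_cons_of_mem k hi)) (pvRound (2^k) pre) tail
      (by rw [length_pvRound]; exact hpre)

theorem mobrec_short (xs : List Int) (h : xs.length ≤ 1) : mobrec xs = xs := by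
  rw [mobrec]; rw [dif_pos h]

-- ===== VERDICT (by name: the statement is the Claim_ definition above) =====
theorem mobius_transform_spec : Claim_equal_mobius_transform := by
  unfold Claim_equal_mobius_transform
  intro tt n _hdom hpre
  unfold Spec_mobius_transform mobius_transform mobius_transform_alt
  obtain ⟨hn, hor⟩ := hpre
  set N := n.toNat with hNdef
  have hcast : ((N : Nat) : Int) = n := Int.toNat_of_nonneg hn
  simp only [Nat.one_shiftLeft]
  rw [PySem.List.slice_to tt (Int.natCast_nonneg _), PySem.List.slice_from tt (Int.natCast_nonneg _)]
  simp only [Int.toNat_natCast]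
  by_cases hlen : 2^N ≤ tt.length
  · have hrange : PySem.List.pyRange 0 n 1 = (List.range N).map (fun k => ((k : Nat) : Int)) := by
      rw [PySem.List.pyRange_one]
      simp only [zero_add, sub_zero, ← hNdef]
    rw [hrange, List.foldl_map]
    simp only [Int.toNat_natCast]
    have hA := pvMaster N (List.range N) (fun i hi => List.mem_range.mp hi)
      (tt.take (2^N)) (tt.drop (2^N)) (by simp [List.length_take]; omega)
    rw [List.take_append_drop] at hA
    rw [hA, pvRounds_eq_mobrec N _ (by simp [List.length_take]; omega)]
  · have htt : tt = [] ∧ N = 0 := by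
      rcases hor with h0 | ⟨hne, hlog⟩
      · have hN0 : N = 0 := by rw [hNdef, h0]; rfl
        refine ⟨?_, hN0⟩
        rw [hN0] at hlen
        simp only [pow_zero] at hlen
        cases tt with
        | nil => rfl
        | cons x xs => simp at hlen
      · exact absurd ((Nat.le_log2 (by simpa using hne)).mp hlog) hlen
    obtain ⟨httnil, hN0⟩ := htt
    subst httnil
    have hn0 : n = 0 := by omega
    rw [PySem.List.pyRange_one_eq_nil (a := 0) (b := n) (by omega),
      List.foldl_nil, List.take_nil, List.drop_nil,
      mobrec_short [] (by simp), List.append_nil]
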